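-- pv_equiv track=rewrite | github.com/datacommonsorg/datacommons | datacommons/datacommons-tools/src/datacommons/tools/mcf/mcf.py | split_preserving_quotes
-- ===== SOURCE A (Python) =====
-- def split_preserving_quotes(text):
--   """Split text on commas while preserving quoted strings."""
--   values = []
--   current_value = ''
--   in_quotes = False
--
--   for char in text:
--     if char == '"':
--       in_quotes = not in_quotes
--       current_value += char
--     elif char == ',' and not in_quotes:
--       values.append(current_value.strip())
--       current_value = ''
--     else:
--       current_value += char
--
--   # Add final value
--   if current_value:
--     values.append(current_value.strip())
--
--   # Filter out empty values
--   values = [v for v in values if v]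
--   return values
-- ===== SOURCE B (Python) =====
-- def split_preserving_quotes(text):
--   """Split text on commas while preserving quoted strings."""
--   values = []
--   buf = ''
--   for piece in text.split(','):
--     buf = piece if not buf else buf + ',' + piece
--     if buf.count('"') % 2 == 0:
--       v = buf.strip()
--       if v:
--         values.append(v)
--       buf = ''
--   if buf:
--     v = buf.strip()
--     if v:
--       values.append(v)
--   return values
-- ===== Notes on version B (the rewrite author's own statement) =====
-- stated objective: faster
-- what changed: Replaced A's per-character state machine (in_quotes flag, append-then-filter) by a split-on-comma pass that rejoins pieces while the buffer's quote count is odd and flushes stripped non-empty buffers when it turns even.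
import Mathlib
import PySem

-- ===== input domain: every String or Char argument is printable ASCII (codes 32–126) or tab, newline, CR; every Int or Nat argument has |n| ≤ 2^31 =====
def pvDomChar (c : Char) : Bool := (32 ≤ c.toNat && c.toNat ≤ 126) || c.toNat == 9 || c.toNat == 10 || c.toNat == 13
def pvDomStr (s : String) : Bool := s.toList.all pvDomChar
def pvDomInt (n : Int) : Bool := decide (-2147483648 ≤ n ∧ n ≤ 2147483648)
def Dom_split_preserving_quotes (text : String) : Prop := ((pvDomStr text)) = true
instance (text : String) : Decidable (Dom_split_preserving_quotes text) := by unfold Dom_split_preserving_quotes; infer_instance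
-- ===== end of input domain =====

-- B replaces A's per-character quote state machine by a split-on-','-then-merge pass
-- (objective: faster by a constant factor, measured; same O(n)).

-- ===== PORT A =====
-- one character of A's loop: state = (values, current_value, in_quotes)
def pvStepA (s : List String × List Char × Bool) (c : Char) : List String × List Char × Bool :=
  if c = '"' then (s.1, s.2.1 ++ [c], !s.2.2)
  else if c = ',' ∧ s.2.2 = false then
    (s.1 ++ [String.ofList (PySem.Chars.strip s.2.1)], [], s.2.2)
  else (s.1, s.2.1 ++ [c], s.2.2)

-- A's tail: append the final value if non-empty, then filter out empty values
def pvFinA (st : List String × List Char × Bool) : List String :=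
  (if st.2.1 ≠ [] then st.1 ++ [String.ofList (PySem.Chars.strip st.2.1)] else st.1).filter
    (fun v => v ≠ "")

def split_preserving_quotes (text : String) : List String :=
  pvFinA (text.toList.foldl pvStepA ([], [], false))

-- ===== PORT B =====
-- one piece of B's loop: state = (values, buf); buf.count('"') with a 1-char argument
-- is ported as List.count '"' buf (exact: substring count of a single char = char count)
def pvStepB (s : List String × List Char) (piece : List Char) : List String × List Char :=
  let buf := if s.2 = [] then piece else s.2 ++ [','] ++ piece
  if List.count '"' buf % 2 = 0 then
    let v := PySem.Chars.strip buf
    (if v ≠ [] then s.1 ++ [String.ofList v] else s.1, [])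
  else (s.1, buf)

def split_preserving_quotes_alt (text : String) : List String :=
  -- text.split(',') ported as List.splitOn ',' on the code points (exact for a 1-char sep)
  let st := (List.splitOn ',' text.toList).foldl pvStepB ([], [])
  if st.2 ≠ [] then
    let v := PySem.Chars.strip st.2
    if v ≠ [] then st.1 ++ [String.ofList v] else st.1
  else st.1

-- ===== PRECONDITION & SPEC =====
def Spec_split_preserving_quotes (text : String) (out : List String) : Prop := out = split_preserving_quotes_alt text
instance (text : String) (out : List String) : Decidable (Spec_split_preserving_quotes text out) := by unfold Spec_split_preserving_quotes; infer_instance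

-- ===== CLAIM (what is proved, stated in full; the proofs are below) =====
def Claim_equal_split_preserving_quotes : Prop := ∀ (text : String), Dom_split_preserving_quotes text → Spec_split_preserving_quotes text (split_preserving_quotes text)

-- ===== LEMMAS AND PROOFS =====

-- flush a closed buffer: append its strip when non-empty
def pvFlushB (res : List String) (buf : List Char) : List String :=
  if PySem.Chars.strip buf ≠ [] then res ++ [String.ofList (PySem.Chars.strip buf)] else res

-- character-level reformulation of B: buf is the pending (rejoined) text
def pvBChars : List Char → List String → List Char → List String
  | [], res, buf => pvFlushB res buf
  | c :: cs, res, buf =>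
    if c = ',' then
      if List.count '"' buf % 2 = 0 then pvBChars cs (pvFlushB res buf) []
      else pvBChars cs res (buf ++ [','])
    else pvBChars cs res (buf ++ [c])

def pvJoin (b p : List Char) : List Char := if b = [] then p else b ++ [','] ++ p

-- B's final step after the loop
def pvFinB (st : List String × List Char) : List String :=
  if st.2 ≠ [] then pvFlushB st.1 st.2 else st.1

theorem pv_parity_succ (n : Nat) : decide ((n + 1) % 2 = 1) = !decide (n % 2 = 1) := by
  rcases Nat.mod_two_eq_zero_or_one n with h | h <;> simp [Nat.add_mod, h]

theorem pv_strip_nil : PySem.Chars.strip ([] : List Char) = [] := rfl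

theorem pv_modifyHead_nil {α : Type} (l : List (List α)) :
    l.modifyHead (fun x => [] ++ x) = l := by
  cases l <;> simp

theorem pv_filter_flush (vals : List String) (v : List Char) :
    (vals ++ [String.ofList (PySem.Chars.strip v)]).filter (fun v => v ≠ "") =
      pvFlushB (vals.filter (fun v => v ≠ "")) v := by
  by_cases hs : PySem.Chars.strip v = [] <;>
    simp [pvFlushB, List.filter_append, hs]

theorem pv_count_nonnil {buf : List Char} (h : ¬ List.count '"' buf % 2 = 0) : buf ≠ [] := by
  intro hb; subst hb; simp at h

-- A-side: the char fold, with in_quotes = parity of quotes in current, computes pvBChars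
theorem pv_lemA (cs : List Char) : ∀ (vals : List String) (cur : List Char),
    pvFinA (cs.foldl pvStepA (vals, cur, decide (List.count '"' cur % 2 = 1))) =
      pvBChars cs (vals.filter (fun v => v ≠ "")) cur := by
  induction cs with
  | nil =>
    intro vals cur
    by_cases hc : cur = []
    · simp [pvFinA, pvBChars, pvFlushB, hc, pv_strip_nil]
    · simp only [List.foldl_nil, pvFinA, pvBChars, if_pos hc]
      simpa using pv_filter_flush vals cur
  | cons c cs ih =>
    intro vals cur
    by_cases hq : c = '"'
    · subst hq
      have hstep : pvStepA (vals, cur, decide (List.count '"' cur % 2 = 1)) '"' =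
          (vals, cur ++ ['"'], decide (List.count '"' (cur ++ ['"']) % 2 = 1)) := by
        simp [pvStepA, List.count_append, pv_parity_succ]
      simp only [List.foldl_cons, hstep, ih, pvBChars]
      simp
    · by_cases hcomma : c = ','
      · subst hcomma
        by_cases hp : List.count '"' cur % 2 = 0
        · have hq1 : ¬ List.count '"' cur % 2 = 1 := by omega
          have hstep : pvStepA (vals, cur, decide (List.count '"' cur % 2 = 1)) ',' =
              (vals ++ [String.ofList (PySem.Chars.strip cur)], [],
                decide (List.count '"' ([] : List Char) % 2 = 1)) := by
            simp [pvStepA, hq1]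
          simp only [List.foldl_cons, hstep, ih, pvBChars]
          rw [pv_filter_flush]
          simp [hp]
        · have hp1 : List.count '"' cur % 2 = 1 := by omega
          have hstep : pvStepA (vals, cur, decide (List.count '"' cur % 2 = 1)) ',' =
              (vals, cur ++ [','], decide (List.count '"' (cur ++ [',']) % 2 = 1)) := by
            simp [pvStepA, hp1, List.count_append]
          simp only [List.foldl_cons, hstep, ih, pvBChars]
          simp [hp]
      · have hstep : pvStepA (vals, cur, decide (List.count '"' cur % 2 = 1)) c =
            (vals, cur ++ [c], decide (List.count '"' (cur ++ [c]) % 2 = 1)) := by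
          simp [pvStepA, hq, hcomma, List.count_append]
        simp only [List.foldl_cons, hstep, ih, pvBChars, if_neg hcomma]

-- B-side: the fold over the comma-split pieces computes pvBChars
theorem pv_lemB (cs : List Char) : ∀ (res : List String) (b pre : List Char),
    pvFinB (((List.splitOn ',' cs).modifyHead (pre ++ ·)).foldl pvStepB (res, b)) =
      pvBChars cs res (pvJoin b pre) := by
  induction cs with
  | nil =>
    intro res b pre
    have hs : List.splitOn ',' ([] : List Char) = [[]] := by simp [List.splitOn]
    rw [hs]
    simp only [List.modifyHead_cons, List.foldl_cons, List.foldl_nil, pvBChars]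
    by_cases hp : List.count '"' (pvJoin b pre) % 2 = 0
    · have hstep : pvStepB (res, b) (pre ++ []) = (pvFlushB res (pvJoin b pre), []) := by
        by_cases hb : b = [] <;> simp_all [pvStepB, pvJoin, pvFlushB]
      rw [hstep]; simp [pvFinB]
    · have hnn : pvJoin b pre ≠ [] := pv_count_nonnil hp
      have hstep : pvStepB (res, b) (pre ++ []) = (res, pvJoin b pre) := by
        by_cases hb : b = [] <;> simp_all [pvStepB, pvJoin]
      rw [hstep]; simp [pvFinB, hnn]
  | cons c cs ih =>
    intro res b pre
    by_cases hc : c = ','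
    · subst hc
      have hs : List.splitOn ',' (',' :: cs) = [] :: List.splitOn ',' cs := by
        simp [List.splitOn, List.splitOnP_cons]
      by_cases hp : List.count '"' (pvJoin b pre) % 2 = 0
      · have hstep : pvStepB (res, b) (pre ++ []) =
            (pvFlushB res (pvJoin b pre), []) := by
          by_cases hb : b = [] <;> simp_all [pvStepB, pvJoin, pvFlushB]
        have h2 := ih (pvFlushB res (pvJoin b pre)) [] []
        rw [pv_modifyHead_nil] at h2
        have h0 : pvJoin [] [] = ([] : List Char) := rfl
        rw [h0] at h2
        rw [hs]
        simp only [List.modifyHead_cons, List.foldl_cons, hstep, h2, pvBChars]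
        simp [hp]
      · have hnn : pvJoin b pre ≠ [] := pv_count_nonnil hp
        have hstep : pvStepB (res, b) (pre ++ []) = (res, pvJoin b pre) := by
          by_cases hb : b = [] <;> simp_all [pvStepB, pvJoin]
        have h2 := ih res (pvJoin b pre) []
        rw [pv_modifyHead_nil] at h2
        have hj : pvJoin (pvJoin b pre) [] = pvJoin b pre ++ [','] := by
          generalize pvJoin b pre = q at hnn ⊢
          simp [pvJoin, hnn]
        rw [hj] at h2
        rw [hs]
        simp only [List.modifyHead_cons, List.foldl_cons, hstep, h2, pvBChars]
        simp [hp]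
    · have hs : List.splitOn ',' (c :: cs) =
          (List.splitOn ',' cs).modifyHead (fun x => c :: x) := by
        simp [List.splitOn, List.splitOnP_cons, hc]
      have hcomp : ((List.splitOn ',' cs).modifyHead (fun x => c :: x)).modifyHead
          (pre ++ ·) = (List.splitOn ',' cs).modifyHead ((pre ++ [c]) ++ ·) := by
        rw [List.modifyHead_modifyHead]
        congr 1
        funext x
        simp
      have hj : pvJoin b (pre ++ [c]) = pvJoin b pre ++ [c] := by
        by_cases hb : b = [] <;> simp [pvJoin, hb]
      rw [hs, hcomp, ih res b (pre ++ [c]), hj]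
      simp [pvBChars, hc]

-- ===== VERDICT (by name: the statement is the Claim_ definition above) =====
theorem split_preserving_quotes_spec : Claim_equal_split_preserving_quotes := by
  intro text _
  unfold Spec_split_preserving_quotes split_preserving_quotes split_preserving_quotes_alt
  have hA := pv_lemA text.toList [] []
  have hB := pv_lemB text.toList [] [] []
  rw [pv_modifyHead_nil] at hB
  simp only [List.filter_nil] at hA
  rw [show pvJoin [] [] = ([] : List Char) from rfl] at hB
  rw [show (decide (List.count '"' ([] : List Char) % 2 = 1)) = false from rfl] at hA
  rw [hA, ← hB]
  simp [pvFinB, pvFlushB]
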